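-- pv_equiv track=rewrite | github.com/jpegdigital/grove-sync | src/commands/calibrate.py | _duration_buckets
-- ===== SOURCE A (Python) =====
-- def _duration_buckets(videos: list[dict]) -> dict:
--     buckets = {
--         "under_1m": 0,
--         "1_5m": 0,
--         "5_10m": 0,
--         "10_20m": 0,
--         "20_30m": 0,
--         "30_60m": 0,
--         "1_2h": 0,
--         "over_2h": 0,
--     }
--     for v in videos:
--         d = v.get("duration_seconds", 0)
--         if d < 60:
--             buckets["under_1m"] += 1
--         elif d < 300:
--             buckets["1_5m"] += 1
--         elif d < 600:
--             buckets["5_10m"] += 1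
--         elif d < 1200:
--             buckets["10_20m"] += 1
--         elif d < 1800:
--             buckets["20_30m"] += 1
--         elif d < 3600:
--             buckets["30_60m"] += 1
--         elif d < 7200:
--             buckets["1_2h"] += 1
--         else:
--             buckets["over_2h"] += 1
--     return buckets
-- ===== SOURCE B (Python) =====
-- # Table-driven re-implementation: classify each duration by its rank in a
-- # sorted threshold table and count into a fixed-size array, then label.
-- _THRESHOLDS = [60, 300, 600, 1200, 1800, 3600, 7200]
-- _NAMES = ["under_1m", "1_5m", "5_10m", "10_20m", "20_30m", "30_60m", "1_2h", "over_2h"]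
--
-- def _duration_buckets(videos: list[dict]) -> dict:
--     counts = [0] * 8
--     for v in videos:
--         d = v.get("duration_seconds", 0)
--         idx = sum(t <= d for t in _THRESHOLDS)
--         counts[idx] += 1
--     return dict(zip(_NAMES, counts))
-- ===== Notes on version B (the rewrite author's own statement) =====
-- stated objective: idiomatic
-- what changed: Replaces the eight-branch if/elif ladder and hand-initialized dict with a sorted threshold table: each duration's bucket index is its rank among the thresholds, counted into a fixed-size array that is zipped with the bucket names at the end.
import Mathlib
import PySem

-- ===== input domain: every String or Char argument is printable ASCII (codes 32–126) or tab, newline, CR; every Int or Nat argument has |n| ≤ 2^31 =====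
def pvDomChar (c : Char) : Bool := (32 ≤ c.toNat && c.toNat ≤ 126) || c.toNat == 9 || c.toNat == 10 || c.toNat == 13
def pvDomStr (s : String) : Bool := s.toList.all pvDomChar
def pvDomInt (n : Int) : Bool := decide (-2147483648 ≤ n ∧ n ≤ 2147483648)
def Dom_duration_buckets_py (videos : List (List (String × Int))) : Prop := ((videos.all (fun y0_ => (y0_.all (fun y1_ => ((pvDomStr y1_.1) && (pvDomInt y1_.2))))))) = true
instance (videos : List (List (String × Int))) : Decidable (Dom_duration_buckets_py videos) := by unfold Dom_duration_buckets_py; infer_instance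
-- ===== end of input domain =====

-- B replaces A's eight-branch if/elif ladder and literal dict with a sorted
-- threshold table: bucket index = rank among thresholds, counted into a fixed
-- array and zipped with the names (objective: idiomatic table-driven code).

-- ===== PORT A =====
-- one iteration of A's for-loop: default-0 lookup, then the if/elif ladder
def pvAStep (b : PySem.Dict String Int) (v : List (String × Int)) : PySem.Dict String Int :=
  let d := (PySem.Dict.mk v).getD "duration_seconds" 0
  if d < 60 then b.modify "under_1m" 0 (· + 1)
  else if d < 300 then b.modify "1_5m" 0 (· + 1)
  else if d < 600 then b.modify "5_10m" 0 (· + 1)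
  else if d < 1200 then b.modify "10_20m" 0 (· + 1)
  else if d < 1800 then b.modify "20_30m" 0 (· + 1)
  else if d < 3600 then b.modify "30_60m" 0 (· + 1)
  else if d < 7200 then b.modify "1_2h" 0 (· + 1)
  else b.modify "over_2h" 0 (· + 1)

def duration_buckets_py (videos : List (List (String × Int))) : List (String × Int) :=
  (videos.foldl pvAStep (PySem.Dict.ofList
    [("under_1m", 0), ("1_5m", 0), ("5_10m", 0), ("10_20m", 0),
     ("20_30m", 0), ("30_60m", 0), ("1_2h", 0), ("over_2h", 0)])).items

-- ===== PORT B =====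
def pvThresholds : List Int := [60, 300, 600, 1200, 1800, 3600, 7200]
def pvNames : List String :=
  ["under_1m", "1_5m", "5_10m", "10_20m", "20_30m", "30_60m", "1_2h", "over_2h"]

-- one iteration of B's loop: idx = sum(t <= d for t in _THRESHOLDS); counts[idx] += 1
def pvBStep (counts : List Int) (v : List (String × Int)) : List Int :=
  let d := (PySem.Dict.mk v).getD "duration_seconds" 0
  let idx := pvThresholds.foldl (fun a t => a + (if t ≤ d then 1 else 0)) 0
  counts.set idx (counts.getD idx 0 + 1)

def duration_buckets_py_alt (videos : List (List (String × Int))) : List (String × Int) :=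
  pvNames.zip (videos.foldl pvBStep (List.replicate 8 0))

-- ===== PRECONDITION & SPEC =====
def Spec_duration_buckets_py (videos : List (List (String × Int))) (out : List (String × Int)) : Prop := out = duration_buckets_py_alt videos
instance (videos : List (List (String × Int))) (out : List (String × Int)) : Decidable (Spec_duration_buckets_py videos out) := by unfold Spec_duration_buckets_py; infer_instance

-- ===== CLAIM (what is proved, stated in full; the proofs are below) =====
def Claim_equal_duration_buckets_py : Prop := ∀ (videos : List (List (String × Int))), Dom_duration_buckets_py videos → Spec_duration_buckets_py videos (duration_buckets_py videos)

-- ===== LEMMAS AND PROOFS =====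

-- one step of A on a labelled state equals the names zipped with one step of B
theorem pv_step (v : List (String × Int)) (c0 c1 c2 c3 c4 c5 c6 c7 : Int) :
    pvAStep (PySem.Dict.mk (pvNames.zip [c0, c1, c2, c3, c4, c5, c6, c7])) v =
    PySem.Dict.mk (pvNames.zip (pvBStep [c0, c1, c2, c3, c4, c5, c6, c7] v)) := by
  unfold pvAStep pvBStep
  set d := (PySem.Dict.mk v).getD "duration_seconds" 0 with hd
  clear_value d
  simp only []
  split_ifs with h1 h2 h3 h4 h5 h6 h7
  · simp [pvNames, pvThresholds, PySem.Dict.modify, PySem.Dict.insert, PySem.Dict.getD, PySem.Dict.get?, PySem.Dict.contains, List.foldl,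
      show ¬((60:Int) ≤ d) by omega, show ¬((300:Int) ≤ d) by omega, show ¬((600:Int) ≤ d) by omega, show ¬((1200:Int) ≤ d) by omega, show ¬((1800:Int) ≤ d) by omega, show ¬((3600:Int) ≤ d) by omega, show ¬((7200:Int) ≤ d) by omega]
  · simp [pvNames, pvThresholds, PySem.Dict.modify, PySem.Dict.insert, PySem.Dict.getD, PySem.Dict.get?, PySem.Dict.contains, List.foldl,
      show (60:Int) ≤ d by omega, show ¬((300:Int) ≤ d) by omega, show ¬((600:Int) ≤ d) by omega, show ¬((1200:Int) ≤ d) by omega, show ¬((1800:Int) ≤ d) by omega, show ¬((3600:Int) ≤ d) by omega, show ¬((7200:Int) ≤ d) by omega]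
  · simp [pvNames, pvThresholds, PySem.Dict.modify, PySem.Dict.insert, PySem.Dict.getD, PySem.Dict.get?, PySem.Dict.contains, List.foldl,
      show (60:Int) ≤ d by omega, show (300:Int) ≤ d by omega, show ¬((600:Int) ≤ d) by omega, show ¬((1200:Int) ≤ d) by omega, show ¬((1800:Int) ≤ d) by omega, show ¬((3600:Int) ≤ d) by omega, show ¬((7200:Int) ≤ d) by omega]
  · simp [pvNames, pvThresholds, PySem.Dict.modify, PySem.Dict.insert, PySem.Dict.getD, PySem.Dict.get?, PySem.Dict.contains, List.foldl,
      show (60:Int) ≤ d by omega, show (300:Int) ≤ d by omega, show (600:Int) ≤ d by omega, show ¬((1200:Int) ≤ d) by omega, show ¬((1800:Int) ≤ d) by omega, show ¬((3600:Int) ≤ d) by omega, show ¬((7200:Int) ≤ d) by omega]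
  · simp [pvNames, pvThresholds, PySem.Dict.modify, PySem.Dict.insert, PySem.Dict.getD, PySem.Dict.get?, PySem.Dict.contains, List.foldl,
      show (60:Int) ≤ d by omega, show (300:Int) ≤ d by omega, show (600:Int) ≤ d by omega, show (1200:Int) ≤ d by omega, show ¬((1800:Int) ≤ d) by omega, show ¬((3600:Int) ≤ d) by omega, show ¬((7200:Int) ≤ d) by omega]
  · simp [pvNames, pvThresholds, PySem.Dict.modify, PySem.Dict.insert, PySem.Dict.getD, PySem.Dict.get?, PySem.Dict.contains, List.foldl,
      show (60:Int) ≤ d by omega, show (300:Int) ≤ d by omega, show (600:Int) ≤ d by omega, show (1200:Int) ≤ d by omega, show (1800:Int) ≤ d by omega, show ¬((3600:Int) ≤ d) by omega, show ¬((7200:Int) ≤ d) by omega]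
  · simp [pvNames, pvThresholds, PySem.Dict.modify, PySem.Dict.insert, PySem.Dict.getD, PySem.Dict.get?, PySem.Dict.contains, List.foldl,
      show (60:Int) ≤ d by omega, show (300:Int) ≤ d by omega, show (600:Int) ≤ d by omega, show (1200:Int) ≤ d by omega, show (1800:Int) ≤ d by omega, show (3600:Int) ≤ d by omega, show ¬((7200:Int) ≤ d) by omega]
  · simp [pvNames, pvThresholds, PySem.Dict.modify, PySem.Dict.insert, PySem.Dict.getD, PySem.Dict.get?, PySem.Dict.contains, List.foldl,
      show (60:Int) ≤ d by omega, show (300:Int) ≤ d by omega, show (600:Int) ≤ d by omega, show (1200:Int) ≤ d by omega, show (1800:Int) ≤ d by omega, show (3600:Int) ≤ d by omega, show (7200:Int) ≤ d by omega]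

-- the loop invariant: A's dict fold is B's counts fold with the labels zipped on
theorem pv_fold (videos : List (List (String × Int))) :
    ∀ c0 c1 c2 c3 c4 c5 c6 c7 : Int,
    videos.foldl pvAStep (PySem.Dict.mk (pvNames.zip [c0, c1, c2, c3, c4, c5, c6, c7])) =
    PySem.Dict.mk (pvNames.zip (videos.foldl pvBStep [c0, c1, c2, c3, c4, c5, c6, c7])) := by
  induction videos with
  | nil => intro _ _ _ _ _ _ _ _; rfl
  | cons v vs ih =>
    intro c0 c1 c2 c3 c4 c5 c6 c7
    rw [List.foldl_cons, List.foldl_cons, pv_step]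
    have hlen : (pvBStep [c0, c1, c2, c3, c4, c5, c6, c7] v).length = 8 := by
      simp [pvBStep]
    match hB : pvBStep [c0, c1, c2, c3, c4, c5, c6, c7] v, hlen with
    | [b0, b1, b2, b3, b4, b5, b6, b7], _ => exact ih b0 b1 b2 b3 b4 b5 b6 b7

-- ===== VERDICT (by name: the statement is the Claim_ definition above) =====
theorem duration_buckets_py_spec : Claim_equal_duration_buckets_py := by
  intro videos _
  unfold Spec_duration_buckets_py duration_buckets_py duration_buckets_py_alt
  have h0 : (PySem.Dict.ofList
    [(("under_1m":String), (0:Int)), ("1_5m", 0), ("5_10m", 0), ("10_20m", 0),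
     ("20_30m", 0), ("30_60m", 0), ("1_2h", 0), ("over_2h", 0)]) =
    PySem.Dict.mk (pvNames.zip [0, 0, 0, 0, 0, 0, 0, 0]) := by decide
  rw [h0, pv_fold]
  rfl
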